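-- pv_equiv track=rewrite | github.com/Large-scale-Sustainable-Computing-LSC/green-code | src/eval/opt_exit_point.py | get_optimal_exit_point
-- ===== SOURCE A (Python) =====
-- def get_optimal_exit_point(label, states):
--     opt_exit_index = - 1
--     last_layer_token = states[-1]['prediction']
--     first_last_match = -1
--     for idx, state in enumerate(states):
--         if state["prediction"] == label and opt_exit_index == - 1:
--             opt_exit_index = idx
--
--         if state["prediction"] == last_layer_token and first_last_match == - 1:
--             first_last_match = idx
--     return opt_exit_index, first_last_match, last_layer_token
-- ===== SOURCE B (Python) =====
-- def get_optimal_exit_point(label, states):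
--     last_layer_token = states[-1]["prediction"]
--     opt_exit_index = next((i for i, s in enumerate(states) if s["prediction"] == label), -1)
--     first_last_match = next((i for i, s in enumerate(states) if s["prediction"] == last_layer_token), -1)
--     return opt_exit_index, first_last_match, last_layer_token
-- ===== Notes on version B (the rewrite author's own statement) =====
-- stated objective: idiomatic
-- what changed: Replaces the single fused loop carrying two -1 guard flags by two independent short-circuiting first-index scans (next over enumerate), one per target token.
import Mathlib
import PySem

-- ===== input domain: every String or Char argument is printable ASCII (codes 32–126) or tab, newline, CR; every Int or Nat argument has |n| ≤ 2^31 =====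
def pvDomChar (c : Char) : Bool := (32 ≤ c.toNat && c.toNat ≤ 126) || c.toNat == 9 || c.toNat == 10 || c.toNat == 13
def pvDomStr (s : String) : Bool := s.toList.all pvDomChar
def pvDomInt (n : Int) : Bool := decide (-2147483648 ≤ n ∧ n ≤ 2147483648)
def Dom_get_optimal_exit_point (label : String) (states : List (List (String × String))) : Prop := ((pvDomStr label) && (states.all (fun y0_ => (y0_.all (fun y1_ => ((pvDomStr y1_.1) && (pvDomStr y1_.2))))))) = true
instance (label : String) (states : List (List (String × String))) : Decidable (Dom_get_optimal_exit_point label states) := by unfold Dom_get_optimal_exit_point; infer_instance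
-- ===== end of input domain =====

-- B replaces A's single fused loop with two -1 guard flags by two independent short-circuiting
-- first-index scans (idiomatic next(...) over enumerate); same cost, no speed claim.

-- ===== PORT A =====
def get_optimal_exit_point (label : String) (states : List (List (String × String))) : Int × Int × String :=
  let last_layer_token := (((PySem.List.pyGet? states (-1)).getD []).lookup "prediction").getD ""
  let r := (PySem.List.enumerate states 0).foldl
    (fun (acc : Int × Int) p =>
      let pred := (p.2.lookup "prediction").getD ""
      (if pred == label && acc.1 == -1 then p.1 else acc.1,
       if pred == last_layer_token && acc.2 == -1 then p.1 else acc.2))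
    ((-1 : Int), (-1 : Int))
  (r.1, r.2, last_layer_token)

-- ===== PORT B =====
-- first index i (counting from i0) whose 'prediction' equals target; -1 if none (B's next(...,-1))
def pvFirstIdx (target : String) (states : List (List (String × String))) (i0 : Int) : Int :=
  match states with
  | [] => -1
  | s :: rest => if (s.lookup "prediction").getD "" == target then i0 else pvFirstIdx target rest (i0 + 1)

def get_optimal_exit_point_alt (label : String) (states : List (List (String × String))) : Int × Int × String :=
  let last_layer_token := (((PySem.List.pyGet? states (-1)).getD []).lookup "prediction").getD ""
  (pvFirstIdx label states 0, pvFirstIdx last_layer_token states 0, last_layer_token)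

-- ===== PRECONDITION & SPEC =====
-- Pre_ excludes exactly the inputs where Python A raises: empty states (IndexError on states[-1])
-- or a state without a 'prediction' key (KeyError).
def Pre_get_optimal_exit_point (label : String) (states : List (List (String × String))) : Prop :=
  states ≠ [] ∧ ∀ s ∈ states, (s.lookup "prediction").isSome
instance (label : String) (states : List (List (String × String))) : Decidable (Pre_get_optimal_exit_point label states) := by unfold Pre_get_optimal_exit_point; infer_instance
def pvWitness_get_optimal_exit_point : String × (List (List (String × String))) := ("a", [[("prediction", "b")], [("prediction", "a")]])
def Spec_get_optimal_exit_point (label : String) (states : List (List (String × String))) (out : Int × Int × String) : Prop := out = get_optimal_exit_point_alt label states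
instance (label : String) (states : List (List (String × String))) (out : Int × Int × String) : Decidable (Spec_get_optimal_exit_point label states out) := by unfold Spec_get_optimal_exit_point; infer_instance

-- ===== CLAIM (what is proved, stated in full; the proofs are below) =====
def Claim_equal_get_optimal_exit_point : Prop := ∀ (label : String) (states : List (List (String × String))), Dom_get_optimal_exit_point label states → Pre_get_optimal_exit_point label states → Spec_get_optimal_exit_point label states (get_optimal_exit_point label states)

-- ===== LEMMAS AND PROOFS =====
lemma pvFirstIdx_cons (t : String) (x : List (String × String)) (xs : List (List (String × String))) (i0 : Int) :
    pvFirstIdx t (x :: xs) i0 = if (x.lookup "prediction").getD "" == t then i0 else pvFirstIdx t xs (i0 + 1) := rfl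

lemma pv_fold (label last : String) :
    ∀ (states : List (List (String × String))) (s o f : Int), 0 ≤ s →
      (PySem.List.enumerate states s).foldl
        (fun (acc : Int × Int) p =>
          let pred := (p.2.lookup "prediction").getD ""
          (if pred == label && acc.1 == -1 then p.1 else acc.1,
           if pred == last && acc.2 == -1 then p.1 else acc.2)) (o, f)
      = ((if o = -1 then pvFirstIdx label states s else o),
         (if f = -1 then pvFirstIdx last states s else f)) := by
  intro states
  induction states with
  | nil => intro s o f _; simp [PySem.List.enumerate_nil, pvFirstIdx]
  | cons x xs ih =>
    intro s o f hs
    rw [PySem.List.enumerate_cons, List.foldl_cons]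
    simp only []
    rw [ih (s + 1) _ _ (by omega), pvFirstIdx_cons, pvFirstIdx_cons]
    by_cases h1 : ((x.lookup "prediction").getD "" == label) = true <;>
      by_cases h2 : ((x.lookup "prediction").getD "" == last) = true <;>
      by_cases h3 : o = -1 <;> by_cases h4 : f = -1 <;>
      simp [h1, h2, h3, h4] <;> omega

lemma pv_main (label : String) (states : List (List (String × String))) :
    get_optimal_exit_point label states = get_optimal_exit_point_alt label states := by
  unfold get_optimal_exit_point get_optimal_exit_point_alt
  simp only [pv_fold label ((List.lookup "prediction" ((PySem.List.pyGet? states (-1)).getD [])).getD "") states 0 (-1) (-1) (by omega)]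
  simp


-- ===== VERDICT (by name: the statement is the Claim_ definition above) =====
theorem get_optimal_exit_point_spec : Claim_equal_get_optimal_exit_point := by
  intro label states _ _
  unfold Spec_get_optimal_exit_point
  exact pv_main label states
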